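-- pv_equiv track=rewrite | github.com/Salome2010/IntroProgramacion | recu.py | cuantos_sufijos_son_palindromos
-- ===== SOURCE A (Python) =====
-- def cuantos_sufijos_son_palindromos(texto:str) -> int:
--     total:int = 0
--     listaSufijos:[str] = []
--     mismoTexto:[str] = list(str(texto))
--     palabra=""
--     while mismoTexto!=[]:
--         for i in range(len(mismoTexto)):
--             palabra+=mismoTexto[i]
--         listaSufijos.append(palabra)
--         mismoTexto.pop()
--         palabra=""
--     for i in range(len(listaSufijos)):
--         if esPolindromo(listaSufijos[i]):
--             total+=1
--     return total
--
-- def esPolindromo(texto:str) -> bool: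
--     mismoTexto:[str] = list(str(texto))
--     for i in range(len(mismoTexto)):
--         if mismoTexto[i] != mismoTexto[len(mismoTexto)-1-i]:
--             return False
--     return True
-- ===== SOURCE B (Python) =====
-- def cuantos_sufijos_son_palindromos(texto: str) -> int:
--     return sum(1 for i in range(1, len(texto) + 1)
--                if texto[:i] == texto[i - 1::-1])
-- ===== Notes on version B (the rewrite author's own statement) =====
-- stated objective: simpler
-- what changed: A builds every prefix explicitly by a while-loop with pop and character-by-character string concatenation into a list, then runs a separate index-mirror palindrome helper over that list; B is a single comprehension over prefix lengths that counts the slices equal to their own reversal.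
import Mathlib
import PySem

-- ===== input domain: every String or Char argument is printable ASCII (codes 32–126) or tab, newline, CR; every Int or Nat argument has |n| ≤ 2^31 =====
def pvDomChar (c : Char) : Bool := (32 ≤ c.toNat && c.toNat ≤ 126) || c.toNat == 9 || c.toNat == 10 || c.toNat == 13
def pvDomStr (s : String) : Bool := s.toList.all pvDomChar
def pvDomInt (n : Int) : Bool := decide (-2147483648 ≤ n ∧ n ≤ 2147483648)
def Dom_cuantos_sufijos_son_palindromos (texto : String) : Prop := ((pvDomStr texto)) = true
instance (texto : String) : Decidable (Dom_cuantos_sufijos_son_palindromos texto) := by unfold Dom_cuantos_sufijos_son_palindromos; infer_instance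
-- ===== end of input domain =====

-- B replaces A's explicit prefix-list construction (while + pop + char-by-char copy) and its
-- helper esPolindromo by a single comprehension over prefix lengths comparing each slice with
-- its reversal; objective: simpler (same asymptotic cost).

-- ===== PORT A =====
-- for i in range(len(mismoTexto)): palabra += mismoTexto[i]   (index always in range, so getD is exact)
def pvBuildWord (m : List Char) : List Char :=
  (List.range m.length).foldl (fun palabra i => palabra ++ [m.getD i ' ']) []

-- while mismoTexto != []: (build palabra); listaSufijos.append(palabra); mismoTexto.pop()
def pvWhileLoop (m : List Char) (lista : List (List Char)) : List (List Char) :=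
  if m = [] then lista
  else pvWhileLoop m.dropLast (lista ++ [pvBuildWord m])
termination_by m.length
decreasing_by
  have hne : m ≠ [] := by assumption
  have : m.length ≠ 0 := fun h => hne (List.length_eq_zero_iff.mp h)
  simp [List.length_dropLast]; omega

-- for i in range(len(mismoTexto)): if mismoTexto[i] != mismoTexto[len-1-i]: return False   (early return; in-range indices)
def pvEsPolLoop (m : List Char) (i : Nat) : Bool :=
  if i < m.length then
    if m.getD i ' ' ≠ m.getD (m.length - 1 - i) ' ' then false
    else pvEsPolLoop m (i + 1)
  else true
termination_by m.length - i

def esPolindromo (t : List Char) : Bool := pvEsPolLoop t 0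

def cuantos_sufijos_son_palindromos (texto : String) : Int :=
  let listaSufijos := pvWhileLoop texto.toList []
  (List.range listaSufijos.length).foldl
    (fun total i => if esPolindromo (listaSufijos.getD i []) then total + 1 else total) 0

-- ===== PORT B =====
-- sum(1 for i in range(1, len(texto)+1) if texto[:i] == texto[i-1::-1]);
-- texto[:i] is s.take i and texto[i-1::-1] (i ≥ 1) is the reversal of the first i characters.
def cuantos_sufijos_son_palindromos_alt (texto : String) : Int :=
  let s := texto.toList
  ((PySem.List.pyRange 1 ((s.length : Int) + 1)).map
    (fun i => if s.take i.toNat = (s.take i.toNat).reverse then (1 : Int) else 0)).sum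

-- ===== PRECONDITION & SPEC =====
def Spec_cuantos_sufijos_son_palindromos (texto : String) (out : Int) : Prop := out = cuantos_sufijos_son_palindromos_alt texto
instance (texto : String) (out : Int) : Decidable (Spec_cuantos_sufijos_son_palindromos texto out) := by unfold Spec_cuantos_sufijos_son_palindromos; infer_instance

-- ===== CLAIM (what is proved, stated in full; the proofs are below) =====
def Claim_equal_cuantos_sufijos_son_palindromos : Prop := ∀ (texto : String), Dom_cuantos_sufijos_son_palindromos texto → Spec_cuantos_sufijos_son_palindromos texto (cuantos_sufijos_son_palindromos texto)

-- ===== LEMMAS AND PROOFS =====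

-- palabra-building copies the list
lemma pvBuild_take (m : List Char) : ∀ n, n ≤ m.length →
    (List.range n).foldl (fun palabra i => palabra ++ [m.getD i ' ']) [] = m.take n := by
  intro n
  induction n with
  | zero => intro _; simp
  | succ k ih =>
    intro h
    rw [List.range_succ, List.foldl_append, ih (by omega)]
    have hk : k < m.length := by omega
    rw [List.take_add_one]
    simp [List.getElem?_eq_getElem hk]

lemma pvBuildWord_eq (m : List Char) : pvBuildWord m = m := by
  unfold pvBuildWord
  rw [pvBuild_take m m.length (le_refl _), List.take_length]

-- the while loop produces the prefixes in decreasing length order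
lemma pvWhileLoop_eq (n : Nat) : ∀ (m : List Char), m.length = n → ∀ lista,
    pvWhileLoop m lista = lista ++ (List.range n).map (fun j => m.take (n - j)) := by
  induction n with
  | zero =>
    intro m hm lista
    have : m = [] := List.length_eq_zero_iff.mp hm
    subst this
    rw [pvWhileLoop]; simp
  | succ k ih =>
    intro m hm lista
    have hne : m ≠ [] := by intro h; subst h; simp at hm
    rw [pvWhileLoop, if_neg hne, pvBuildWord_eq]
    have hdl : m.dropLast.length = k := by simp [List.length_dropLast, hm]
    rw [ih m.dropLast hdl (lista ++ [m])]
    rw [List.range_succ_eq_map]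
    simp only [List.map_cons, List.map_map, List.append_assoc, List.singleton_append,
      Nat.sub_zero, ← hm, List.take_length]
    congr 1
    congr 1
    apply List.map_congr_left
    intro j hj
    have hjk : j < k := List.mem_range.mp hj
    simp only [Function.comp]
    rw [List.dropLast_eq_take, List.take_take]
    congr 1
    omega

-- the early-return index loop decides "palindrome from position i outward"
lemma pvEsPolLoop_iff (m : List Char) (i : Nat) :
    pvEsPolLoop m i = true ↔
      ∀ j, i ≤ j → j < m.length → m.getD j ' ' = m.getD (m.length - 1 - j) ' ' := by
  refine pvEsPolLoop.induct m
    (fun i => pvEsPolLoop m i = true ↔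
      ∀ j, i ≤ j → j < m.length → m.getD j ' ' = m.getD (m.length - 1 - j) ' ')
    ?_ ?_ ?_ i
  · intro x hx hne
    rw [pvEsPolLoop, if_pos hx, if_pos hne]
    refine iff_of_false (by simp) ?_
    intro h
    exact hne (h x (le_refl _) hx)
  · intro x hx hne ih
    rw [pvEsPolLoop, if_pos hx, if_neg hne]
    rw [ih]
    constructor
    · intro h j hij hj
      rcases Nat.eq_or_lt_of_le hij with rfl | hlt
      · exact not_ne_iff.mp hne
      · exact h j hlt hj
    · intro h j hij hj
      exact h j (by omega) hj
  · intro x hx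
    rw [pvEsPolLoop, if_neg hx]
    refine iff_of_true rfl ?_
    intro j hij hj
    omega

lemma esPolindromo_eq (t : List Char) : esPolindromo t = decide (t = t.reverse) := by
  cases h : esPolindromo t with
  | false =>
    symm; rw [decide_eq_false_iff_not]
    intro heq
    unfold esPolindromo at h
    have hforall : ∀ j, 0 ≤ j → j < t.length → t.getD j ' ' = t.getD (t.length - 1 - j) ' ' := by
      intro j _ hj
      have h1 : t.length - 1 - j < t.length := by omega
      rw [List.getD_eq_getElem t ' ' hj, List.getD_eq_getElem t ' ' h1]
      calc t[j] = t.reverse[j]'(by simpa using hj) := List.getElem_of_eq heq hj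
        _ = t[t.length - 1 - j] := by rw [List.getElem_reverse]
    have := (pvEsPolLoop_iff t 0).mpr hforall
    rw [h] at this
    exact Bool.false_ne_true this
  | true =>
    symm; rw [decide_eq_true_eq]
    unfold esPolindromo at h
    have hall := (pvEsPolLoop_iff t 0).mp h
    apply List.ext_getElem (by simp)
    intro i h1 h2
    have h2' : i < t.length := h1
    have h3 : t.length - 1 - i < t.length := by omega
    have := hall i (Nat.zero_le _) h2'
    rw [List.getD_eq_getElem t ' ' h2', List.getD_eq_getElem t ' ' h3] at this
    rw [List.getElem_reverse]
    exact this

-- A's final counting loop over range(len(listaSufijos)) is a countP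
lemma foldl_getD_count (L : List (List Char)) (f : List Char → Bool) :
    (List.range L.length).foldl (fun (t : Int) i => if f (L.getD i []) then t + 1 else t) 0
    = ((List.range L.length).countP (fun i => f (L.getD i [])) : Int) := by
  simp only [PySem.List.foldl_count_if]
  rw [zero_add]

-- pyRange 1 (n+1) enumerates 1..n
lemma pyRange_one_eq (n : Nat) :
    PySem.List.pyRange 1 ((n : Int) + 1) = (List.range n).map (fun (j : Nat) => (j : Int) + 1) := by
  induction n with
  | zero => simp [PySem.List.pyRange]
  | succ k ih =>
    have h1 : (1 : Int) ≤ (k : Int) + 1 := by omega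
    have : ((k + 1 : Nat) : Int) + 1 = ((k : Int) + 1) + 1 := by push_cast; ring
    rw [this, PySem.List.pyRange_one_succ_right h1, ih, List.range_succ]
    simp

-- the two counts over range n agree (one counts prefixes in decreasing, one in increasing length)
lemma countP_range_flip (q : Nat → Bool) (n : Nat) :
    (List.range n).countP (fun j => q (n - j)) = (List.range n).countP (fun j => q (j + 1)) := by
  have h1 : (List.range n).countP (fun j => q (n - j)) =
      ((List.range n).map (fun j => n - j)).countP q := by
    rw [List.countP_map]; rfl
  have h2 : (List.range n).countP (fun j => q (j + 1)) =
      ((List.range n).map (fun j => j + 1)).countP q := by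
    rw [List.countP_map]; rfl
  rw [h1, h2]
  have h3 : (List.range n).map (fun j => j + 1) = List.range' 1 n := by
    rw [List.range'_eq_map_range]
    apply List.map_congr_left; intro j _; omega
  have h4 : (List.range n).map (fun j => n - j) = (List.range' 1 n).reverse := by
    rw [List.reverse_range']
    apply List.map_congr_left; intro j _; omega
  rw [h3, h4, List.countP_reverse]

-- ===== VERDICT (by name: the statement is the Claim_ definition above) =====
theorem cuantos_sufijos_son_palindromos_spec : Claim_equal_cuantos_sufijos_son_palindromos := by
  intro texto _
  unfold Spec_cuantos_sufijos_son_palindromos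
  unfold cuantos_sufijos_son_palindromos cuantos_sufijos_son_palindromos_alt
  set s := texto.toList with hs
  set n := s.length with hn
  set q : Nat → Bool := fun i => decide (s.take i = (s.take i).reverse) with hq
  clear_value s n q
  -- A side
  rw [pvWhileLoop_eq n s hn.symm []]
  simp only [List.nil_append]
  refine Eq.trans (foldl_getD_count ((List.range n).map (fun j => s.take (n - j))) esPolindromo) ?_
  have hlen : ((List.range n).map (fun j => s.take (n - j))).length = n := by simp
  rw [hlen]
  have hA : (List.range n).countP
      (fun i => esPolindromo (((List.range n).map (fun j => s.take (n - j))).getD i []))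
      = (List.range n).countP (fun j => q (n - j)) := by
    apply List.countP_congr
    intro i hi
    have hi' : i < n := List.mem_range.mp hi
    rw [PySem.List.getD_map_range _ n i [] hi', esPolindromo_eq]
    simp [hq]
  rw [hA, countP_range_flip q n]
  -- B side
  rw [← hn, pyRange_one_eq n, List.map_map]
  have hB : ((List.range n).map
      ((fun (i : Int) => if s.take i.toNat = (s.take i.toNat).reverse then (1 : Int) else 0) ∘
        fun (j : Nat) => (j : Int) + 1))
      = (List.range n).map (fun j => if (fun j => q (j + 1)) j = true then (1 : Int) else 0) := by
    apply List.map_congr_left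
    intro j _
    simp only [Function.comp_apply, hq, decide_eq_true_eq]
    have ht : ((j : Int) + 1).toNat = j + 1 := by omega
    rw [ht]
  rw [hB, PySem.List.sum_map_ite_one_zero]
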